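-- pv_equiv track=rewrite | github.com/linux-test-project/ltp | doc/conf.py | _generate_options_table
-- ===== SOURCE A (Python) =====
-- def _generate_options_table(options):
--     """
--     Generate the options table from the options hash.
--     """
--     table = [
--         '.. list-table::',
--         '   :header-rows: 1',
--         '',
--         '   * - Option',
--         '     - Description',
--     ]
--
--     for opt in options:
--         if not isinstance(opt, list):
--             table.clear()
--             break
--
--         key = opt[0]
--         val = opt[2]
--
--         if key.endswith(':'):
--             key = key[:-1] if key.endswith(':') else key
--
--         key = f'-{key}'
--
--         table.extend([
--             f'   * - {key}',
--             f'     - {val}',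
--         ])
--
--     return table
-- ===== SOURCE B (Python) =====
-- def _rows(options):
--     """Recursively build the row lines for `options`; None signals a non-list entry."""
--     if not options:
--         return []
--     opt = options[0]
--     if not isinstance(opt, list):
--         return None
--     key = opt[0]
--     if key.endswith(':'):
--         key = key[:-1]
--     val = opt[2]
--     rest = _rows(options[1:])
--     if rest is None:
--         return None
--     return [f'   * - -{key}', f'     - {val}'] + rest
--
--
-- def _generate_options_table(options):
--     """
--     Generate the options table from the options hash.
--     """
--     rows = _rows(list(options))
--     if rows is None:
--         return []
--     return [
--         '.. list-table::',
--         '   :header-rows: 1',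
--         '',
--         '   * - Option',
--         '     - Description',
--     ] + rows
-- ===== Notes on version B (the rewrite author's own statement) =====
-- stated objective: alternative
-- what changed: A mutates one growing table inside an imperative forward loop with a clear/break escape; B is a structural recursion that conses each row pair onto the recursively built tail (rows assembled back-to-front on unwinding), propagating None for a non-list entry, and prepends the constant header at the top level.
import Mathlib
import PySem

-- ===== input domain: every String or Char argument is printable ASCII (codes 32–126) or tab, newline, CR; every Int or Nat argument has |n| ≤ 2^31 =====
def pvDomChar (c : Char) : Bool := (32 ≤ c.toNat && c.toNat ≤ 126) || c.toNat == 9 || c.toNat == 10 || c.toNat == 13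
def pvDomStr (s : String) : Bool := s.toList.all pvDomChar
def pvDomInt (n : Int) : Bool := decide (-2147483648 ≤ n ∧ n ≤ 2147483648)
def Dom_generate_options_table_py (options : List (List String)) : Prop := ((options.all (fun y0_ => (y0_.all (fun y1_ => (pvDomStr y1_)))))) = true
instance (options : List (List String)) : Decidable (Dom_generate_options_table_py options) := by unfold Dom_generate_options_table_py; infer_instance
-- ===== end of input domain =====

-- B replaces A's imperative grow-a-table loop (with its clear/break type escape) by a
-- structural recursion consing row pairs onto the recursively built tail; objective: alternative.


-- ===== PORT A =====
-- literal port of A; at type List (List String) the `isinstance(opt, list)` test is always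
-- true, so the `table.clear(); break` branch is unreachable and is not represented.
-- opt[0] / opt[2] use pyGet?; the IndexError case (none) is excluded by Pre_ below.
def generate_options_table_py (options : List (List String)) : List String :=
  options.foldl
    (fun table opt =>
      let key := (PySem.List.pyGet? opt 0).getD ""
      let val := (PySem.List.pyGet? opt 2).getD ""
      let key := if PySem.Str.endswith key ":" then
                   (if PySem.Str.endswith key ":" then PySem.Str.slice key none (some (-1)) else key)
                 else key
      let key := "-" ++ key
      table ++ ["   * - " ++ key, "     - " ++ val])
    [".. list-table::", "   :header-rows: 1", "", "   * - Option", "     - Description"]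

-- ===== PORT B =====
-- port of Source B's recursive _rows; at type List (List String) the `isinstance` test is
-- identically true, so the None-propagation arms are unreachable and not represented.
def pvRows (options : List (List String)) : List String :=
  match options with
  | [] => []
  | opt :: rest =>
    let key := (PySem.List.pyGet? opt 0).getD ""
    let key := if PySem.Str.endswith key ":" then PySem.Str.slice key none (some (-1)) else key
    let val := (PySem.List.pyGet? opt 2).getD ""
    ("   * - -" ++ key) :: ("     - " ++ val) :: pvRows rest

def generate_options_table_py_alt (options : List (List String)) : List String :=
  [".. list-table::", "   :header-rows: 1", "", "   * - Option", "     - Description"]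
    ++ pvRows options

-- ===== PRECONDITION & SPEC =====
-- Pre_ excludes exactly the inputs where Python A raises IndexError (opt[0] / opt[2] on a
-- row with fewer than 3 entries); A returns normally on every other input of this type.
def Pre_generate_options_table_py (options : List (List String)) : Prop :=
  ∀ opt ∈ options, 3 ≤ opt.length
instance (options : List (List String)) : Decidable (Pre_generate_options_table_py options) := by
  unfold Pre_generate_options_table_py; infer_instance

def pvWitness_generate_options_table_py : List (List String) := [["opt:", "str", "describes opt"]]

def Spec_generate_options_table_py (options : List (List String)) (out : List String) : Prop := out = generate_options_table_py_alt options
instance (options : List (List String)) (out : List String) : Decidable (Spec_generate_options_table_py options out) := by unfold Spec_generate_options_table_py; infer_instance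

-- ===== CLAIM (what is proved, stated in full; the proofs are below) =====
def Claim_equal_generate_options_table_py : Prop := ∀ (options : List (List String)), Dom_generate_options_table_py options → Pre_generate_options_table_py options → Spec_generate_options_table_py options (generate_options_table_py options)

-- ===== LEMMAS AND PROOFS =====
-- loop invariant: A's foldl starting from any accumulator t returns t ++ B's rows
theorem pvFoldl_eq_rows (options : List (List String)) (t : List String) :
    options.foldl
      (fun table opt =>
        let key := (PySem.List.pyGet? opt 0).getD ""
        let val := (PySem.List.pyGet? opt 2).getD ""
        let key := if PySem.Str.endswith key ":" then
                     (if PySem.Str.endswith key ":" then PySem.Str.slice key none (some (-1)) else key)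
                   else key
        let key := "-" ++ key
        table ++ ["   * - " ++ key, "     - " ++ val]) t
    = t ++ pvRows options := by
  induction options generalizing t with
  | nil => simp [pvRows]
  | cons opt rest ih =>
    simp only [List.foldl_cons, ih, pvRows, List.append_assoc]
    split_ifs <;> simp_all [← String.append_assoc]

-- ===== VERDICT (by name: the statement is the Claim_ definition above) =====
theorem generate_options_table_py_spec : Claim_equal_generate_options_table_py := by
  intro options _ _
  unfold Spec_generate_options_table_py generate_options_table_py generate_options_table_py_alt
  exact pvFoldl_eq_rows options _
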